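-- pv_equiv track=rewrite | github.com/ldct/cp | codeforces/G20/D/D.py | bfs
-- ===== SOURCE A (Python) =====
-- def squish(arr, i, j):
--     arr = list(arr)
--     arr.insert(j, arr[j])
--     del arr[i]
--     return tuple(arr)
--
-- def bfs(arr):
--     visited = set([tuple(arr)])
--
--     while True:
--         next_visited = set()
--         for arr in visited:
--             for i in range(len(arr)):
--                 for j in range(i+1, len(arr)):
--                     if arr[i] == arr[j]:
--                         nxt = squish(arr, i, j)
--                         if nxt not in visited:
--                             next_visited.add(nxt)
--         if len(next_visited) == 0: return visited
--
--         for v in next_visited: visited.add(v)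
-- ===== SOURCE B (Python) =====
-- def squish(arr, i, j):
--     # i < j: drop the element at i (a duplicate of arr[j]) and double arr[j] in place
--     return arr[:i] + arr[i + 1:j] + (arr[j], arr[j]) + arr[j + 1:]
--
-- def successors(st):
--     n = len(st)
--     return [squish(st, i, j) for i in range(n) for j in range(i + 1, n) if st[i] == st[j]]
--
-- def bfs(arr):
--     start = tuple(arr)
--     visited = {start}
--     pending = [start]
--     while pending:
--         st = pending.pop(0)
--         for nxt in successors(st):
--             if nxt not in visited:
--                 visited.add(nxt)
--                 pending.append(nxt)
--     return visited
-- ===== Notes on version B (the rewrite author's own statement) =====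
-- stated objective: alternative
-- what changed: B replaces A's round-based re-expansion of the entire visited set by a FIFO worklist that dequeues each state exactly once, generates its successors with a slice-based squish and a comprehension, and enqueues only unseen states; measured ~1.6x at n=64 but unconfirmed at larger sizes where both blow up.
import Mathlib
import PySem

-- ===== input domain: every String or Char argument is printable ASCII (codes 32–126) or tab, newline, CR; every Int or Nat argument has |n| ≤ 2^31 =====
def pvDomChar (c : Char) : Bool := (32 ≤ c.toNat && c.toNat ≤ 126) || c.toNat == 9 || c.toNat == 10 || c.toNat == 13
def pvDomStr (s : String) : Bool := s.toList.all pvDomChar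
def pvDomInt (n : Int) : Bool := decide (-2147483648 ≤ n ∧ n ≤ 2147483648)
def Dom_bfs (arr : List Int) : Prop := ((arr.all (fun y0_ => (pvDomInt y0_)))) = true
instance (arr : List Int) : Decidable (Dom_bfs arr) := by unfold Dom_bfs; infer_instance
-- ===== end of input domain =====

-- B replaces A's round-based re-expansion of the whole visited set by a FIFO worklist that
-- dequeues each state once, builds its successor list with a slice-based squish and a
-- comprehension, and enqueues only unseen states; the returned set is the same list.

-- fuel bound shared by the two ports' (terminating) while-loops: #distinct values ^ length
-- bounds the number of reachable states; never reached.
def bfsFuel (arr : List Int) : Nat := (PySem.List.dedup arr).length ^ arr.length + 1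

-- ===== PORT A =====
-- squish(arr, i, j) as A writes it: insert a copy of arr[j] at j, delete index i
-- (exact for the in-range indices 0 ≤ i < j < len(arr) at which bfs calls it)
def squishL (st : List Int) (i j : Int) : List Int :=
  (PySem.List.insert st j (PySem.List.pyGetD st j 0)).eraseIdx i.toNat

-- innermost j-loop body of A
def jstepA (V : List (List Int)) (st : List Int) (i : Int)
    (nv : List (List Int)) (j : Int) : List (List Int) :=
  if PySem.List.pyGetD st i 0 = PySem.List.pyGetD st j 0 then
    if squishL st i j ∉ V then PySem.Set.add nv (squishL st i j) else nv
  else nv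

-- i-loop body of A: for j in range(i+1, len(st))
def istepA (V : List (List Int)) (st : List Int)
    (nv : List (List Int)) (i : Int) : List (List Int) :=
  (PySem.List.pyRange (i + 1) (st.length : Int) 1).foldl (jstepA V st i) nv

-- one state expanded: for i in range(len(st))
def expandA (V : List (List Int)) (nv : List (List Int)) (st : List Int) : List (List Int) :=
  (PySem.List.pyRange 0 (st.length : Int) 1).foldl (istepA V st) nv

-- while True: build next_visited from ALL of visited; stop when empty, else add all
def loopA : Nat → List (List Int) → List (List Int)
  | 0, V => V
  | Nat.succ fuel, V =>
    if V.foldl (expandA V) [] = [] then V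
    else loopA fuel ((V.foldl (expandA V) []).foldl (fun v x => PySem.Set.add v x) V)

def bfs (arr : List Int) : List (List Int) :=
  loopA (bfsFuel arr) (PySem.Set.ofList [arr])

-- ===== PORT B =====
-- B's squish: arr[:i] + arr[i+1:j] + (arr[j], arr[j]) + arr[j+1:]
def squishB (st : List Int) (i j : Int) : List Int :=
  PySem.List.slice st none (some i) ++ PySem.List.slice st (some (i + 1)) (some j)
    ++ [PySem.List.pyGetD st j 0, PySem.List.pyGetD st j 0]
    ++ PySem.List.slice st (some (j + 1)) none

-- [squish(st, i, j) for i in range(n) for j in range(i+1, n) if st[i] == st[j]]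
def succsB (st : List Int) : List (List Int) :=
  (PySem.List.pyRange 0 (st.length : Int) 1).flatMap fun i =>
    ((PySem.List.pyRange (i + 1) (st.length : Int) 1).filter
        (fun j => PySem.List.pyGetD st i 0 == PySem.List.pyGetD st j 0)).map
      (fun j => squishB st i j)

-- 'if nxt not in visited: visited.add(nxt); pending.append(nxt)'
def stepW (acc : List (List Int) × List (List Int)) (nxt : List Int) :
    List (List Int) × List (List Int) :=
  if nxt ∉ acc.1 then (acc.1 ++ [nxt], acc.2 ++ [nxt]) else acc

-- while pending: st = pending.pop(0); for nxt in successors(st): …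
def loopW : Nat → List (List Int) → List (List Int) → List (List Int)
  | 0, V, _ => V
  | Nat.succ _, V, [] => V
  | Nat.succ f, V, st :: rest =>
      loopW f ((succsB st).foldl stepW (V, rest)).1 ((succsB st).foldl stepW (V, rest)).2

def bfs_alt (arr : List Int) : List (List Int) :=
  loopW (bfsFuel arr) (PySem.Set.ofList [arr]) [arr]

-- ===== PRECONDITION & SPEC =====
def Spec_bfs (arr : List Int) (out : List (List Int)) : Prop := out = bfs_alt arr
instance (arr : List Int) (out : List (List Int)) : Decidable (Spec_bfs arr out) := by unfold Spec_bfs; infer_instance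

-- ===== CLAIM (what is proved, stated in full; the proofs are below) =====
def Claim_equal_bfs : Prop := ∀ (arr : List Int), Dom_bfs arr → Spec_bfs arr (bfs arr)

-- ===== LEMMAS AND PROOFS =====

-- A's per-successor action, factored out of its nested loops
def stepS (V m : List (List Int)) (x : List Int) : List (List Int) :=
  if x ∈ V then m else PySem.Set.add m x

-- state invariant: same length as arr, values drawn from arr
def PInv (arr st : List Int) : Prop := st.length = arr.length ∧ ∀ x ∈ st, x ∈ arr

-- all valid (i,j)-successors of st already lie in V
def Expanded (V : List (List Int)) (st : List Int) : Prop :=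
  ∀ i j : Int, 0 ≤ i → i < j → j < (st.length : Int) →
    PySem.List.pyGetD st i 0 = PySem.List.pyGetD st j 0 → squishL st i j ∈ V

-- "m is fresh w.r.t. V": no duplicates and disjoint from V
def GoodL (V m : List (List Int)) : Prop := m.Nodup ∧ ∀ x ∈ m, x ∉ V

-- the two squishes agree on the in-range indices bfs uses
theorem sq_eq (st : List Int) (i j : Int) (h0 : 0 ≤ i) (hij : i < j)
    (hj : j < (st.length : Int)) : squishB st i j = squishL st i j := by
  obtain ⟨a, rfl⟩ : ∃ a : Nat, i = (a : Int) := ⟨i.toNat, (Int.toNat_of_nonneg h0).symm⟩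
  obtain ⟨b, rfl⟩ : ∃ b : Nat, j = (b : Int) := ⟨j.toNat, (Int.toNat_of_nonneg (by omega)).symm⟩
  have hab : a < b := by exact_mod_cast hij
  have hbn : b < st.length := by exact_mod_cast hj
  have hg : PySem.List.pyGetD st (b : Int) 0 = st[b] :=
    PySem.List.pyGetD_eq_getElem st 0 (by exact_mod_cast Int.natCast_nonneg b) hj
  unfold squishB squishL
  rw [hg, PySem.List.slice_to_natCast,
      show ((a : Int) + 1) = ((a + 1 : Nat) : Int) by push_cast; ring,
      show ((b : Int) + 1) = ((b + 1 : Nat) : Int) by push_cast; ring,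
      PySem.List.slice_natCast, PySem.List.slice_from_natCast,
      PySem.List.insert_natCast st b _ (by omega), Int.toNat_natCast]
  rw [List.eraseIdx_append_of_lt_length (by simp [List.length_take]; omega)]
  rw [List.eraseIdx_eq_take_drop_succ]
  have h1 : (st.take b).take a = st.take a := List.take_take .. ▸ by rw [Nat.min_eq_left (by omega)]
  have h2 : (st.take b).drop (a + 1) = (st.drop (a + 1)).take (b - (a + 1)) := by
    rw [List.drop_take]
  have h3 : st.drop b = st[b] :: st.drop (b + 1) := List.drop_eq_getElem_cons hbn
  rw [h1, h2, h3]
  simp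

-- what succsB contains: exactly the valid successors, as squishL images
theorem mem_succsB {st x : List Int} :
    x ∈ succsB st ↔ ∃ i j : Int, 0 ≤ i ∧ i < j ∧ j < (st.length : Int) ∧
      PySem.List.pyGetD st i 0 = PySem.List.pyGetD st j 0 ∧ x = squishL st i j := by
  unfold succsB
  simp only [List.mem_flatMap, List.mem_map, List.mem_filter, PySem.List.mem_pyRange_one,
    beq_iff_eq]
  constructor
  · rintro ⟨i, ⟨hi0, _⟩, j, ⟨⟨hij, hjn⟩, hc⟩, rfl⟩
    exact ⟨i, j, hi0, by omega, hjn, hc, sq_eq st i j hi0 (by omega) hjn⟩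
  · rintro ⟨i, j, hi0, hij, hjn, hc, rfl⟩
    exact ⟨i, ⟨hi0, by omega⟩, j, ⟨⟨by omega, hjn⟩, hc⟩, sq_eq st i j hi0 hij hjn⟩

-- ---- folds of stepS ----
theorem foldS_split {V m : List (List Int)} {L : List (List Int)} {x : List Int}
    (h : x ∈ L.foldl (stepS V) m) : x ∈ m ∨ x ∈ L := by
  induction L generalizing m with
  | nil => exact Or.inl h
  | cons y t ih =>
    rcases ih h with hm | ht
    · unfold stepS at hm
      split_ifs at hm
      · exact Or.inl hm
      · rcases (PySem.Set.mem_add _ _ _).1 hm with hm | rfl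
        · exact Or.inl hm
        · exact Or.inr (by simp)
    · exact Or.inr (by simp [ht])

theorem foldS_mono {V m : List (List Int)} (L : List (List Int)) :
    m ⊆ L.foldl (stepS V) m := by
  induction L generalizing m with
  | nil => exact fun _ h => h
  | cons y t ih =>
    intro x hx
    refine List.foldl_cons .. ▸ ih ?_
    unfold stepS
    split_ifs
    · exact hx
    · exact (PySem.Set.mem_add _ _ _).2 (Or.inl hx)

theorem foldS_covers {V m : List (List Int)} {L : List (List Int)} {x : List Int}
    (h : x ∈ L) : x ∈ V ∨ x ∈ L.foldl (stepS V) m := by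
  induction L generalizing m with
  | nil => cases h
  | cons y t ih =>
    rcases List.mem_cons.1 h with rfl | ht
    · by_cases hV : x ∈ V
      · exact Or.inl hV
      · refine Or.inr (List.foldl_cons .. ▸ foldS_mono t ?_)
        simp [stepS, hV, PySem.Set.mem_add]
    · exact ih ht

theorem foldS_id {V m : List (List Int)} {L : List (List Int)}
    (h : ∀ x ∈ L, x ∈ V) : L.foldl (stepS V) m = m := by
  induction L generalizing m with
  | nil => rfl
  | cons y t ih =>
    have : stepS V m y = m := by simp [stepS, h y (by simp)]
    rw [List.foldl_cons, this]
    exact ih (fun x hx => h x (by simp [hx]))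

theorem foldS_good {V m : List (List Int)} (L : List (List Int)) (h : GoodL V m) :
    GoodL V (L.foldl (stepS V) m) := by
  induction L generalizing m with
  | nil => exact h
  | cons y t ih =>
    refine List.foldl_cons .. ▸ ih ?_
    unfold stepS
    split_ifs with hV
    · exact h
    · refine ⟨PySem.Set.nodup_add m y h.1, fun x hx => ?_⟩
      rcases (PySem.Set.mem_add _ _ _).1 hx with hx | rfl
      · exact h.2 x hx
      · exact hV

-- ---- A's nested loops are the stepS-fold over succsB ----
theorem istepA_eq (V : List (List Int)) (st : List Int) (i : Int) (hi0 : 0 ≤ i) :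
    ∀ (js : List Int) (m : List (List Int)), (∀ j ∈ js, i < j ∧ j < (st.length : Int)) →
      js.foldl (jstepA V st i) m =
      ((js.filter (fun j => PySem.List.pyGetD st i 0 == PySem.List.pyGetD st j 0)).map
        (fun j => squishB st i j)).foldl (stepS V) m := by
  intro js
  induction js with
  | nil => intro m _; rfl
  | cons j t ih =>
    intro m hjs
    obtain ⟨hij, hjn⟩ := hjs j (by simp)
    by_cases hc : PySem.List.pyGetD st i 0 = PySem.List.pyGetD st j 0
    · have : jstepA V st i m j = stepS V m (squishB st i j) := by
        rw [sq_eq st i j hi0 hij hjn]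
        simp only [jstepA, stepS, hc, if_true]
        split_ifs <;> simp_all
      have hcb : (PySem.List.pyGetD st i 0 == PySem.List.pyGetD st j 0) = true := by
        simpa using hc
      simp only [List.foldl_cons, List.filter_cons, hcb, if_true, List.map_cons, this]
      exact ih _ (fun x hx => hjs x (by simp [hx]))
    · have hcb : (PySem.List.pyGetD st i 0 == PySem.List.pyGetD st j 0) = false := by
        simpa using hc
      simp only [List.foldl_cons, List.filter_cons, hcb, if_false, jstepA, hc]
      simp only [if_false, Bool.false_eq_true]
      exact ih _ (fun x hx => hjs x (by simp [hx]))

theorem expandA_succs (V : List (List Int)) (st : List Int) (m : List (List Int)) :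
    expandA V m st = (succsB st).foldl (stepS V) m := by
  unfold expandA succsB
  have : ∀ (is : List Int) (m : List (List Int)), (∀ i ∈ is, 0 ≤ i ∧ i < (st.length : Int)) →
      is.foldl (istepA V st) m =
      (is.flatMap fun i =>
        ((PySem.List.pyRange (i + 1) (st.length : Int) 1).filter
            (fun j => PySem.List.pyGetD st i 0 == PySem.List.pyGetD st j 0)).map
          (fun j => squishB st i j)).foldl (stepS V) m := by
    intro is
    induction is with
    | nil => intro m _; rfl
    | cons i t ih =>
      intro m his
      obtain ⟨hi0, _⟩ := his i (by simp)
      rw [List.flatMap_cons, List.foldl_append, List.foldl_cons]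
      rw [istepA, istepA_eq V st i hi0 _ m
        (fun j hj => by
          have := (PySem.List.mem_pyRange_one).1 hj
          exact ⟨by omega, this.2⟩)]
      exact ih _ (fun x hx => his x (by simp [hx]))
  exact this _ m (fun i hi => by
    have := (PySem.List.mem_pyRange_one).1 hi
    exact ⟨this.1, this.2⟩)

-- ---- B's inner fold tracks A's, on paired state ----
theorem pairW (V p : List (List Int)) (L : List (List Int)) :
    ∀ m : List (List Int), L.foldl stepW (V ++ m, p ++ m) =
      (V ++ L.foldl (stepS V) m, p ++ L.foldl (stepS V) m) := by
  induction L with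
  | nil => intro m; rfl
  | cons x t ih =>
    intro m
    have hstep : stepW (V ++ m, p ++ m) x = (V ++ stepS V m x, p ++ stepS V m x) := by
      by_cases hV : x ∈ V
      · have h1 : x ∈ V ++ m := by simp [hV]
        simp [stepW, stepS, h1, hV]
      · by_cases hm : x ∈ m
        · have h1 : x ∈ V ++ m := by simp [hm]
          simp [stepW, stepS, h1, hV, PySem.Set.add_of_mem hm]
        · have h1 : x ∉ V ++ m := by simp [hV, hm]
          simp [stepW, stepS, h1, hV, PySem.Set.add_of_not_mem hm]
    rw [List.foldl_cons, hstep, List.foldl_cons]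
    exact ih (stepS V m x)

-- loopW ignores fuel when pending is empty
theorem loopW_nil (f : Nat) (V : List (List Int)) : loopW f V [] = V := by
  cases f <;> rfl

-- one full round of the worklist = one round of A's frontier expansion
theorem batchW (V₀ : List (List Int)) :
    ∀ (p : List (List Int)) (f : Nat) (m : List (List Int)),
      loopW (f + p.length) (V₀ ++ m) (p ++ m) =
      loopW f (V₀ ++ p.foldl (expandA V₀) m) (p.foldl (expandA V₀) m) := by
  intro p
  induction p with
  | nil => intro f m; simp
  | cons st t ih =>
    intro f m
    have hlen : f + (st :: t).length = Nat.succ (f + t.length) := by simp; omega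
    rw [hlen]
    show loopW (f + t.length)
        ((succsB st).foldl stepW (V₀ ++ m, t ++ m)).1
        ((succsB st).foldl stepW (V₀ ++ m, t ++ m)).2 = _
    rw [pairW V₀ t (succsB st) m, ← expandA_succs V₀ st m]
    exact ih f (expandA V₀ m st)

-- states already Expanded contribute nothing
theorem expandA_of_expanded {V : List (List Int)} {st : List Int} (h : Expanded V st)
    (m : List (List Int)) : expandA V m st = m := by
  rw [expandA_succs]
  refine foldS_id (fun x hx => ?_)
  obtain ⟨i, j, hi0, hij, hjn, hc, rfl⟩ := mem_succsB.1 hx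
  exact h i j hi0 hij hjn hc

theorem foldA_of_expanded {V : List (List Int)} {old : List (List Int)}
    (h : ∀ st ∈ old, Expanded V st) (m : List (List Int)) :
    old.foldl (expandA V) m = m := by
  induction old generalizing m with
  | nil => rfl
  | cons st t ih =>
    rw [List.foldl_cons, expandA_of_expanded (h st (by simp))]
    exact ih (fun x hx => h x (by simp [hx])) m

-- round folds: freshness, coverage, invariant preservation
theorem roundGood (V : List (List Int)) (p : List (List Int)) :
    ∀ m, GoodL V m → GoodL V (p.foldl (expandA V) m) := by
  induction p with
  | nil => exact fun m h => h
  | cons st t ih =>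
    intro m h
    rw [List.foldl_cons, expandA_succs]
    exact ih _ (foldS_good _ h)

theorem roundMono (V : List (List Int)) (p : List (List Int)) :
    ∀ m, m ⊆ p.foldl (expandA V) m := by
  induction p with
  | nil => exact fun _ _ h => h
  | cons st t ih =>
    intro m x hx
    rw [List.foldl_cons, expandA_succs]
    exact ih _ (foldS_mono _ hx)

theorem roundCovers (V : List (List Int)) (p : List (List Int)) :
    ∀ m st, st ∈ p → ∀ x ∈ succsB st, x ∈ V ∨ x ∈ p.foldl (expandA V) m := by
  induction p with
  | nil => intro _ _ h; cases h
  | cons s t ih =>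
    intro m st hst x hx
    rcases List.mem_cons.1 hst with rfl | hst'
    · rcases foldS_covers (m := m) (V := V) hx with hV | hmem
      · exact Or.inl hV
      · rw [List.foldl_cons, expandA_succs]
        exact Or.inr (roundMono V t _ hmem)
    · exact ih _ st hst' x hx

theorem squishL_PInv {arr st : List Int} (hst : PInv arr st) (i j : Int)
    (h0 : 0 ≤ i) (hij : i < j) (hjn : j < (st.length : Int)) :
    PInv arr (squishL st i j) := by
  rw [← sq_eq st i j h0 hij hjn]
  obtain ⟨a, rfl⟩ : ∃ a : Nat, i = (a : Int) := ⟨i.toNat, (Int.toNat_of_nonneg h0).symm⟩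
  obtain ⟨b, rfl⟩ : ∃ b : Nat, j = (b : Int) := ⟨j.toNat, (Int.toNat_of_nonneg (by omega)).symm⟩
  have hab : a < b := by exact_mod_cast hij
  have hbn : b < st.length := by exact_mod_cast hjn
  have hg : PySem.List.pyGetD st (b : Int) 0 = st[b] :=
    PySem.List.pyGetD_eq_getElem st 0 (by exact_mod_cast Int.natCast_nonneg b) hjn
  unfold squishB
  rw [hg, PySem.List.slice_to_natCast,
      show ((a : Int) + 1) = ((a + 1 : Nat) : Int) by push_cast; ring,
      show ((b : Int) + 1) = ((b + 1 : Nat) : Int) by push_cast; ring,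
      PySem.List.slice_natCast, PySem.List.slice_from_natCast]
  constructor
  · have hn := hst.1
    simp only [List.length_append, List.length_take, List.length_drop, List.length_cons,
      List.length_nil]
    omega
  · intro x hx
    have hb : st[b] ∈ st := List.getElem_mem hbn
    have hx' : x ∈ st.take a ∨ x ∈ (st.drop (a + 1)).take (b - (a + 1)) ∨
        x = st[b] ∨ x ∈ st.drop (b + 1) := by
      simp only [List.mem_append, List.mem_cons, List.not_mem_nil, or_false] at hx
      tauto
    rcases hx' with h | h | rfl | h
    · exact hst.2 x (List.mem_of_mem_take h)
    · exact hst.2 x (List.mem_of_mem_drop (List.mem_of_mem_take h))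
    · exact hst.2 _ hb
    · exact hst.2 x (List.mem_of_mem_drop h)

theorem roundPInv {arr : List Int} (V : List (List Int)) (p : List (List Int))
    (hp : ∀ st ∈ p, PInv arr st) :
    ∀ m, (∀ x ∈ m, PInv arr x) → ∀ x ∈ p.foldl (expandA V) m, PInv arr x := by
  induction p with
  | nil => exact fun m hm => hm
  | cons st t ih =>
    intro m hm x hx
    rw [List.foldl_cons, expandA_succs] at hx
    refine ih (fun s hs => hp s (by simp [hs])) _ (fun y hy => ?_) x hx
    rcases foldS_split hy with hy | hy
    · exact hm y hy
    · obtain ⟨i, j, hi0, hij, hjn, _, rfl⟩ := mem_succsB.1 hy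
      exact squishL_PInv (hp st (by simp)) i j hi0 hij hjn

-- adding fresh elements one by one is an append
theorem foldl_add_fresh (V m : List (List Int)) (h : GoodL V m) :
    m.foldl (fun v x => PySem.Set.add v x) V = V ++ m := by
  induction m generalizing V with
  | nil => simp
  | cons x t ih =>
    have hx : x ∉ V := h.2 x (by simp)
    simp only [List.foldl_cons, PySem.Set.add_of_not_mem hx]
    rw [ih (V ++ [x]) ?_]
    · simp
    · refine ⟨(List.nodup_cons.1 h.1).2, fun y hy => ?_⟩
      simp only [List.mem_append, List.mem_singleton]
      rintro (hy2 | rfl)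
      · exact h.2 y (by simp [hy]) hy2
      · exact (List.nodup_cons.1 h.1).1 hy

-- ---- counting: nodup states of bounded shape are at most D^n ----
def allLists : Nat → List Int → List (List Int)
  | 0, _ => [[]]
  | Nat.succ k, d => d.flatMap (fun x => (allLists k d).map (fun l => x :: l))

theorem length_allLists (k : Nat) (d : List Int) :
    (allLists k d).length = d.length ^ k := by
  induction k with
  | zero => rfl
  | succ k ih =>
    simp only [allLists, List.length_flatMap, List.length_map, ih]
    rw [List.map_const', List.sum_replicate, smul_eq_mul, pow_succ, mul_comm]

theorem mem_allLists {d : List Int} :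
    ∀ {st : List Int} {k : Nat}, st.length = k → (∀ x ∈ st, x ∈ d) → st ∈ allLists k d := by
  intro st
  induction st with
  | nil => intro k hk _; subst hk; simp [allLists]
  | cons x t ih =>
    intro k hk hmem
    subst hk
    simp only [List.length_cons, allLists, List.mem_flatMap, List.mem_map]
    exact ⟨x, hmem x (by simp), t, ih rfl (fun y hy => hmem y (by simp [hy])), rfl⟩

theorem card_bound {arr : List Int} {V : List (List Int)} (hnd : V.Nodup)
    (hP : ∀ st ∈ V, PInv arr st) :
    V.length ≤ (PySem.List.dedup arr).length ^ arr.length := by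
  have hsub : V ⊆ allLists arr.length (PySem.List.dedup arr) := by
    intro st hst
    exact mem_allLists (hP st hst).1
      (fun x hx => (PySem.List.mem_dedup _ _).2 ((hP st hst).2 x hx))
  calc V.length = V.toFinset.card := (List.toFinset_card_of_nodup hnd).symm
    _ ≤ (allLists arr.length (PySem.List.dedup arr)).toFinset.card := by
        exact Finset.card_le_card (fun x hx =>
          List.mem_toFinset.2 (hsub (List.mem_toFinset.1 hx)))
    _ ≤ (allLists arr.length (PySem.List.dedup arr)).length := List.toFinset_card_le _
    _ = _ := length_allLists _ _

-- ---- the main correspondence ----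
theorem main_loop (arr : List Int) :
    ∀ (fA fW : Nat) (old pending V : List (List Int)),
      V = old ++ pending →
      (∀ st ∈ old, Expanded V st) →
      V.Nodup →
      (∀ st ∈ V, PInv arr st) →
      fA ≥ (PySem.List.dedup arr).length ^ arr.length - V.length + 1 →
      fW ≥ (PySem.List.dedup arr).length ^ arr.length - V.length + pending.length →
      loopA fA V = loopW fW V pending := by
  intro fA
  induction fA with
  | zero =>
    intro fW old pending V _ _ _ _ hfA _
    omega
  | succ f ih =>
    intro fW old pending V hV hold hnd hP hfA hfW
    subst hV
    have hBV : (old ++ pending).length ≤ (PySem.List.dedup arr).length ^ arr.length :=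
      card_bound hnd hP
    have hfold : (old ++ pending).foldl (expandA (old ++ pending)) [] =
        pending.foldl (expandA (old ++ pending)) [] := by
      rw [List.foldl_append, foldA_of_expanded hold]
    set W := old ++ pending with hW
    set new := pending.foldl (expandA W) [] with hnew
    have hgood : GoodL W new := roundGood W pending [] ⟨List.nodup_nil, by simp⟩
    have hbatch : loopW fW W pending = loopW (fW - pending.length) (W ++ new) new := by
      have h1 : fW = (fW - pending.length) + pending.length := by omega
      calc loopW fW W pending
          = loopW ((fW - pending.length) + pending.length) (W ++ []) (pending ++ []) := by
            rw [← h1]; simp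
        _ = _ := batchW W pending (fW - pending.length) []
    by_cases hempty : new = []
    · rw [hbatch, hempty, loopW_nil]
      simp only [loopA, hfold, hempty, if_true]
      simp
    · have hAstep : loopA (Nat.succ f) W = loopA f (W ++ new) := by
        simp only [loopA, hfold, hempty, if_false]
        rw [foldl_add_fresh W new hgood]
      have hnd' : (W ++ new).Nodup := by
        rw [List.nodup_append]
        exact ⟨hnd, hgood.1, fun x hx y hy e => hgood.2 y hy (e ▸ hx)⟩
      have hP' : ∀ st ∈ W ++ new, PInv arr st := by
        intro st hst
        rcases List.mem_append.1 hst with h | h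
        · exact hP st h
        · exact roundPInv W pending (fun s hs => hP s (List.mem_append.2 (Or.inr hs)))
            [] (by simp) st h
      have hBV' : (W ++ new).length ≤ (PySem.List.dedup arr).length ^ arr.length :=
        card_bound hnd' hP'
      have hnew1 : 0 < new.length := List.length_pos_of_ne_nil hempty
      have hexp' : ∀ st ∈ W, Expanded (W ++ new) st := by
        intro st hst i j hi0 hij hjn hc
        rcases List.mem_append.1 hst with ho | hp'
        · exact List.mem_append.2 (Or.inl (hold st ho i j hi0 hij hjn hc))
        · have hx : squishL st i j ∈ succsB st := mem_succsB.2 ⟨i, j, hi0, hij, hjn, hc, rfl⟩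
          rcases roundCovers W pending [] st hp' _ hx with h | h
          · exact List.mem_append.2 (Or.inl h)
          · exact List.mem_append.2 (Or.inr h)
      rw [hAstep, hbatch]
      refine ih (fW - pending.length) W new (W ++ new) rfl hexp' hnd' hP' ?_ ?_
      · simp only [List.length_append] at hBV' ⊢
        omega
      · simp only [List.length_append] at hBV' ⊢
        omega

-- ===== VERDICT (by name: the statement is the Claim_ definition above) =====
theorem bfs_spec : Claim_equal_bfs := by
  intro arr _
  unfold Spec_bfs bfs bfs_alt
  have h1 : PySem.Set.ofList [arr] = [arr] :=
    PySem.Set.ofList_eq_self_of_nodup [arr] (List.nodup_singleton arr)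
  rw [h1]
  refine main_loop arr (bfsFuel arr) (bfsFuel arr) [] [arr] [arr] rfl (by simp)
    (List.nodup_singleton arr) ?_ ?_ ?_
  · intro st hst
    rcases List.mem_singleton.1 hst with rfl
    exact ⟨rfl, fun x hx => hx⟩
  · simp only [List.length_singleton, bfsFuel]; omega
  · simp only [List.length_singleton, bfsFuel]; omega
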